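-- pv_equiv track=rewrite | github.com/SchriderLab/geneConvSweeps | injectSlim.py | sanitize_slim
-- ===== SOURCE A (Python) =====
-- def sanitize_slim(raw_lines):
--     new_lines = []
--     sanitized_lines = 0
--     mode = 1
--
--     for line in raw_lines:
--         unwantedLine = ("sim.treeSeqOutput(trees_file, metadata=metadata);" in line and mode == 2) or \
--                    "initializeTreeSeq();" in line or \
--                    """"inds=p"+pop+".sampleIndividuals("+n+"); " +""" in line or \
--                    "defineConstant(\"trees_file\"" in line
--         if not unwantedLine:
--             new_lines.append(line)
--         else:
--             sanitized_lines += 1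
--
--         if mode == 1:
--             if line == "function (void)end(void) {":
--                 mode = 2
--         if mode == 2:
--             if "sim.treeSeqOutput(trees_file, metadata=metadata);" in line:
--                 mode = 3
--
--     return new_lines, sanitized_lines
-- ===== SOURCE B (Python) =====
-- PAT = "sim.treeSeqOutput(trees_file, metadata=metadata);"
-- END = "function (void)end(void) {"
--
--
-- def _find_contains(lines, sub):
--     """Index of the first line containing sub, or None."""
--     for k, line in enumerate(lines):
--         if sub in line:
--             return k
--     return None
--
--
-- def sanitize_slim(raw_lines):
--     # Precompute the single index removed by A's mode machine: the first line
--     # containing PAT strictly after the first exact END line.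
--     special = None
--     if END in raw_lines:
--         e = raw_lines.index(END)
--         k = _find_contains(raw_lines[e + 1:], PAT)
--         if k is not None:
--             special = e + 1 + k
--     new_lines = []
--     sanitized_lines = 0
--     for i, line in enumerate(raw_lines):
--         if ("initializeTreeSeq();" in line
--                 or '"inds=p"+pop+".sampleIndividuals("+n+"); " +' in line
--                 or 'defineConstant("trees_file"' in line
--                 or i == special):
--             sanitized_lines += 1
--         else:
--             new_lines.append(line)
--     return new_lines, sanitized_lines
-- ===== Notes on version B (the rewrite author's own statement) =====
-- stated objective: alternative
-- what changed: Replaces the inline three-state mode machine with a precomputed single 'special' index (first treeSeqOutput line strictly after the exact end-function line) followed by one stateless filtering pass.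
import Mathlib
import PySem

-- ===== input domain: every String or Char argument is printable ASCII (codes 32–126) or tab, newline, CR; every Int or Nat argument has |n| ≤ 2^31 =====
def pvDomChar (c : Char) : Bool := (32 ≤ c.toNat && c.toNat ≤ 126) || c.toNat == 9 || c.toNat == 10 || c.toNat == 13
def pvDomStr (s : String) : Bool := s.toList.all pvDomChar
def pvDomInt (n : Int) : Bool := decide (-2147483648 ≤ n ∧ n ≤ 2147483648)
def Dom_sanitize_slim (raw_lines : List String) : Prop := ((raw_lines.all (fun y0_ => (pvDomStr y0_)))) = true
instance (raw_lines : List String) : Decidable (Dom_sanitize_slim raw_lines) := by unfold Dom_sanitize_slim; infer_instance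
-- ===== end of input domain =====

-- B replaces A's inline three-state mode machine by a precomputed single special index
-- (first treeSeqOutput line strictly after the exact end-function line) plus one stateless
-- filtering pass (objective: alternative decomposition; return value proved equal).

-- ===== PORT A =====
def pvPAT : String := "sim.treeSeqOutput(trees_file, metadata=metadata);"
def pvEND : String := "function (void)end(void) {"
def pvP1 : String := "initializeTreeSeq();"
def pvP2 : String := "\"inds=p\"+pop+\".sampleIndividuals(\"+n+\"); \" +"
def pvP3 : String := "defineConstant(\"trees_file\""

-- one iteration of A's for-loop: state = (new_lines, sanitized_lines, mode)
def pvStepA (st : List String × Int × Int) (line : String) : List String × Int × Int :=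
  let unwanted := (PySem.Str.isIn pvPAT line && st.2.2 == 2) || PySem.Str.isIn pvP1 line
      || PySem.Str.isIn pvP2 line || PySem.Str.isIn pvP3 line
  let nl := if unwanted then st.1 else st.1 ++ [line]
  let cnt := if unwanted then st.2.1 + 1 else st.2.1
  let m1 : Int := if st.2.2 == 1 && line == pvEND then 2 else st.2.2
  let m2 : Int := if m1 == 2 && PySem.Str.isIn pvPAT line then 3 else m1
  (nl, cnt, m2)

def sanitize_slim (raw_lines : List String) : List String × Int :=
  let st := raw_lines.foldl pvStepA ([], 0, 1)
  (st.1, st.2.1)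

-- ===== PORT B =====
-- _find_contains from Source B: index of first line containing sub, or None
def pvFindContains (lines : List String) (sub : String) : Option Nat :=
  match lines with
  | [] => none
  | l :: ls => if PySem.Str.isIn sub l then some 0 else (pvFindContains ls sub).map (· + 1)

-- Source B's precomputation of the single special index
def pvSpecial (raw_lines : List String) : Option Nat :=
  if raw_lines.contains pvEND then
    match PySem.List.index? raw_lines pvEND with
    | some e =>
      match pvFindContains (PySem.List.slice raw_lines (some ((e : Int) + 1)) none) pvPAT with
      | some k => some (e + 1 + k)
      | none => none
    | none => none
  else none

-- one iteration of Source B's filtering loop: state = ((new_lines, sanitized_lines), i)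
def pvStepB (special : Option Nat) (st : (List String × Int) × Nat) (line : String) :
    (List String × Int) × Nat :=
  let i := st.2
  let bad := PySem.Str.isIn pvP1 line || PySem.Str.isIn pvP2 line || PySem.Str.isIn pvP3 line
      || (some i == special)
  (if bad then (st.1.1, st.1.2 + 1) else (st.1.1 ++ [line], st.1.2), i + 1)

def sanitize_slim_alt (raw_lines : List String) : List String × Int :=
  let special := pvSpecial raw_lines
  (raw_lines.foldl (pvStepB special) (([], 0), 0)).1

-- ===== PRECONDITION & SPEC =====
def Spec_sanitize_slim (raw_lines : List String) (out : List String × Int) : Prop := out = sanitize_slim_alt raw_lines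
instance (raw_lines : List String) (out : List String × Int) : Decidable (Spec_sanitize_slim raw_lines out) := by unfold Spec_sanitize_slim; infer_instance

-- ===== CLAIM (what is proved, stated in full; the proofs are below) =====
def Claim_equal_sanitize_slim : Prop := ∀ (raw_lines : List String), Dom_sanitize_slim raw_lines → Spec_sanitize_slim raw_lines (sanitize_slim raw_lines)

-- ===== LEMMAS AND PROOFS =====

-- the three unconditional patterns
def pvUncond (line : String) : Bool :=
  PySem.Str.isIn pvP1 line || PySem.Str.isIn pvP2 line || PySem.Str.isIn pvP3 line

-- option predecessor: shifts a relative special index past one consumed line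
def pvPredO : Option Nat → Option Nat
  | some (k + 1) => some k
  | _ => none

-- relative special index as seen from position i
def pvShift (s : Option Nat) (i : Nat) : Option Nat :=
  s.bind (fun j => if i ≤ j then some (j - i) else none)

-- reference filter: one pass with a RELATIVE special index
def pvBRel (s : Option Nat) : List String → List String × Int
  | [] => ([], 0)
  | l :: ls =>
    let r := pvBRel (pvPredO s) ls
    if pvUncond l || s == some 0 then (r.1, r.2 + 1) else (l :: r.1, r.2)

-- relative special index of a suffix, as A's mode machine determines it
def pvSpecRel : List String → Option Nat
  | [] => none
  | l :: ls =>
    if l = pvEND then (pvFindContains ls pvPAT).map (· + 1)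
    else (pvSpecRel ls).map (· + 1)

theorem pvShift_zero (s : Option Nat) : pvShift s 0 = s := by
  cases s <;> simp [pvShift]

theorem pvShift_succ (s : Option Nat) (i : Nat) : pvShift s (i + 1) = pvPredO (pvShift s i) := by
  cases s with
  | none => rfl
  | some j =>
    by_cases h : i + 1 <= j
    · have h' : i <= j := by omega
      have hj : j - i = (j - (i + 1)) + 1 := by omega
      simp only [pvShift, Option.bind_some, if_pos h, if_pos h', hj, pvPredO]
    · by_cases h2 : i <= j
      · have : j = i := by omega
        subst this
        simp [pvShift, h, pvPredO]
      · simp only [pvShift, Option.bind_some, if_neg h, if_neg h2, pvPredO]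

theorem pvShift_beq (s : Option Nat) (i : Nat) :
    (some i == s) = (pvShift s i == some 0) := by
  cases s with
  | none => simp [pvShift]
  | some j =>
    by_cases h : i <= j
    · simp [pvShift, h]
      omega
    · simp [pvShift, h]
      omega

theorem pvStepB_eq (special : Option Nat) (acc : List String) (cnt : Int) (i : Nat)
    (l : String) :
    pvStepB special ((acc, cnt), i) l =
      (if pvUncond l || (pvShift special i == some 0) then (acc, cnt + 1)
        else (acc ++ [l], cnt), i + 1) := by
  simp [pvStepB, pvUncond, pvShift_beq special i, Bool.or_assoc]

theorem pvBRel_cons_pos (s : Option Nat) (l : String) (ls : List String)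
    (h : (pvUncond l || s == some 0) = true) :
    pvBRel s (l :: ls) = ((pvBRel (pvPredO s) ls).1, (pvBRel (pvPredO s) ls).2 + 1) := by
  simp [pvBRel, h]

theorem pvBRel_cons_neg (s : Option Nat) (l : String) (ls : List String)
    (h : (pvUncond l || s == some 0) = false) :
    pvBRel s (l :: ls) = (l :: (pvBRel (pvPredO s) ls).1, (pvBRel (pvPredO s) ls).2) := by
  simp [pvBRel, h]

theorem pvBfold (special : Option Nat) (ls : List String) :
    ∀ (acc : List String) (cnt : Int) (i : Nat),
      ls.foldl (pvStepB special) ((acc, cnt), i) =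
        ((acc ++ (pvBRel (pvShift special i) ls).1, cnt + (pvBRel (pvShift special i) ls).2),
          i + ls.length) := by
  induction ls with
  | nil => intro acc cnt i; simp [pvBRel]
  | cons l ls ih =>
    intro acc cnt i
    rw [List.foldl_cons, pvStepB_eq]
    by_cases hc : (pvUncond l || (pvShift special i == some 0)) = true
    · rw [if_pos hc, ih, pvBRel_cons_pos _ _ _ hc, ← pvShift_succ]
      refine congrArg₂ Prod.mk (congrArg₂ Prod.mk rfl (by ring)) (by simp; omega)
    · rw [if_neg hc, ih, pvBRel_cons_neg _ _ _ (by simpa using hc), ← pvShift_succ]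
      refine congrArg₂ Prod.mk (congrArg₂ Prod.mk (by simp) rfl) (by simp; omega)

theorem pvStepA_eq (acc : List String) (cnt : Int) (m : Int) (l : String) :
    pvStepA (acc, cnt, m) l =
      (if (PySem.Str.isIn pvPAT l && m == 2) || pvUncond l then acc
        else acc ++ [l],
       (if (PySem.Str.isIn pvPAT l && m == 2) || pvUncond l then cnt + 1 else cnt),
       (if (if m == 1 && l == pvEND then 2 else m) == 2 && PySem.Str.isIn pvPAT l then 3
        else (if m == 1 && l == pvEND then 2 else m))) := by
  simp [pvStepA, pvUncond, Bool.or_assoc]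

theorem pvA3 (ls : List String) :
    ∀ (acc : List String) (cnt : Int),
      ls.foldl pvStepA (acc, cnt, 3) =
        (acc ++ (pvBRel none ls).1, cnt + (pvBRel none ls).2, 3) := by
  induction ls with
  | nil => intro acc cnt; simp [pvBRel]
  | cons l ls ih =>
    intro acc cnt
    rw [List.foldl_cons, pvStepA_eq]
    have e1 : ((3 : Int) == 2) = false := by decide
    have e2 : ((3 : Int) == 1) = false := by decide
    simp only [e1, e2, Bool.and_false, Bool.false_and, Bool.false_or, Bool.false_eq_true,
      if_false]
    cases hu : pvUncond l with
    | true =>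
      simp only [hu, if_pos trivial]
      rw [ih]
      simp [pvBRel, hu, pvPredO]
      omega
    | false =>
      simp only [hu, Bool.false_eq_true, if_false]
      rw [ih]
      simp [pvBRel, hu, pvPredO]

theorem pvA2 (ls : List String) :
    ∀ (acc : List String) (cnt : Int),
      ls.foldl pvStepA (acc, cnt, 2) =
        (acc ++ (pvBRel (pvFindContains ls pvPAT) ls).1,
          cnt + (pvBRel (pvFindContains ls pvPAT) ls).2,
          if (pvFindContains ls pvPAT).isSome then 3 else 2) := by
  induction ls with
  | nil => intro acc cnt; simp [pvBRel, pvFindContains]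
  | cons l ls ih =>
    intro acc cnt
    rw [List.foldl_cons, pvStepA_eq]
    have e1 : ((2 : Int) == 2) = true := by decide
    have e2 : ((2 : Int) == 1) = false := by decide
    simp only [e1, e2, Bool.and_true, Bool.false_and, Bool.false_eq_true, if_false]
    cases hp : PySem.Str.isIn pvPAT l with
    | true =>
      have hp' : PySem.Chars.isIn pvPAT.toList l.toList = true := by simpa using hp
      simp only [hp, Bool.true_or, if_pos trivial, Bool.and_self]
      rw [pvA3]
      have hf : pvFindContains (l :: ls) pvPAT = some 0 := by
        simp [pvFindContains, hp']
      simp [hf, pvBRel, pvPredO]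
      omega
    | false =>
      have hp' : PySem.Chars.isIn pvPAT.toList l.toList = false := by simpa using hp
      have hf : pvFindContains (l :: ls) pvPAT = (pvFindContains ls pvPAT).map (· + 1) := by
        simp [pvFindContains, hp']
      simp only [hp, Bool.false_or, Bool.and_false, Bool.false_eq_true, if_false]
      cases hu : pvUncond l with
      | true =>
        simp only [hu, if_pos trivial]
        rw [ih]
        cases hg : pvFindContains ls pvPAT <;>
          simp [hf, hg, pvBRel, pvPredO, hu] <;> omega
      | false =>
        simp only [hu, Bool.false_eq_true, if_false]
        rw [ih]
        cases hg : pvFindContains ls pvPAT <;>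
          simp [hf, hg, pvBRel, pvPredO, hu]

theorem pvEND_not_pat : PySem.Str.isIn pvPAT pvEND = false := by decide

theorem pvA1 (ls : List String) :
    ∀ (acc : List String) (cnt : Int),
      (ls.foldl pvStepA (acc, cnt, 1)).1 = acc ++ (pvBRel (pvSpecRel ls) ls).1 ∧
      (ls.foldl pvStepA (acc, cnt, 1)).2.1 = cnt + (pvBRel (pvSpecRel ls) ls).2 := by
  induction ls with
  | nil => intro acc cnt; simp [pvBRel, pvSpecRel]
  | cons l ls ih =>
    intro acc cnt
    rw [List.foldl_cons, pvStepA_eq]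
    have e1 : ((1 : Int) == 2) = false := by decide
    have e2 : ((1 : Int) == 1) = true := by decide
    have e3 : ((2 : Int) == 2) = true := by decide
    simp only [e1, e2, e3, Bool.and_false, Bool.false_or, Bool.true_and]
    by_cases he : l = pvEND
    · subst he
      have hbe : (pvEND == pvEND) = true := by simp
      simp only [hbe, if_pos trivial, Bool.true_and, pvEND_not_pat, Bool.and_false,
        Bool.false_eq_true, if_false]
      cases hu : pvUncond pvEND with
      | true =>
        simp only [hu, if_pos trivial]
        rw [pvA2]
        cases hg : pvFindContains ls pvPAT <;>
          (simp [pvSpecRel, hg, pvBRel, pvPredO, hu]; try omega)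
      | false =>
        simp only [hu, Bool.false_eq_true, if_false]
        rw [pvA2]
        cases hg : pvFindContains ls pvPAT <;>
          (simp [pvSpecRel, hg, pvBRel, pvPredO, hu]; try omega)
    · have hne : (l == pvEND) = false := by simp [he]
      simp only [hne, Bool.false_eq_true, if_false, Bool.and_false, Bool.false_and, e1]
      cases hu : pvUncond l with
      | true =>
        simp only [hu, if_pos trivial]
        obtain ⟨ih1, ih2⟩ := ih acc (cnt + 1)
        rw [ih1, ih2]
        cases hg : pvSpecRel ls <;>
          (simp [pvSpecRel, he, hg, pvBRel, pvPredO, hu]; try omega)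
      | false =>
        simp only [hu, Bool.false_eq_true, if_false]
        obtain ⟨ih1, ih2⟩ := ih (acc ++ [l]) cnt
        rw [ih1, ih2]
        cases hg : pvSpecRel ls <;>
          (simp [pvSpecRel, he, hg, pvBRel, pvPredO, hu]; try omega)

theorem pvSpecial_eq_specRel (ls : List String) : pvSpecial ls = pvSpecRel ls := by
  induction ls with
  | nil => rfl
  | cons l ls ih =>
    by_cases he : l = pvEND
    · subst he
      have hidx : PySem.List.index? (pvEND :: ls) pvEND = some 0 :=
        PySem.List.index?_cons_self ..
      have hsl : PySem.List.slice (pvEND :: ls) (some (((0 : Nat) : Int) + 1)) none = ls := by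
        have h1 : (((0 : Nat) : Int) + 1) = ((1 : Nat) : Int) := by norm_num
        rw [h1, PySem.List.slice_from_natCast]
        simp
      simp only [pvSpecial, hidx, pvSpecRel, if_pos rfl]
      rw [if_pos (by simp)]
      rw [hsl]
      cases hg : pvFindContains ls pvPAT <;> simp [hg] <;> try omega
    · have hne' : (pvEND == l) = false := by
        rw [beq_eq_false_iff_ne]
        exact fun h => he h.symm
      by_cases hm : pvEND ∈ ls
      · have hidx : PySem.List.index? (l :: ls) pvEND = (PySem.List.index? ls pvEND).map (· + 1) :=
          PySem.List.index?_cons_of_ne ls he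
        obtain ⟨e, hee⟩ := Option.isSome_iff_exists.mp
          ((PySem.List.index?_isSome_iff ..).mpr hm)
        have hsl : PySem.List.slice (l :: ls) (some (((e + 1 : Nat) : Int) + 1)) none
            = PySem.List.slice ls (some (((e : Nat) : Int) + 1)) none := by
          have h1 : (((e + 1 : Nat) : Int) + 1) = ((e + 2 : Nat) : Int) := by push_cast; ring
          have h2 : (((e : Nat) : Int) + 1) = ((e + 1 : Nat) : Int) := by push_cast; ring
          rw [h1, h2, PySem.List.slice_from_natCast, PySem.List.slice_from_natCast]
          simp
        have hmem : (l :: ls).contains pvEND = true := by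
          simpa using Or.inr hm
        have hmem' : ls.contains pvEND = true := by simpa using hm
        simp only [pvSpecial, hidx, hee, Option.map_some, pvSpecRel, he, if_false,
          if_pos hmem, hsl]
        simp only [pvSpecial, hee, if_pos hmem'] at ih
        rw [← ih]
        cases hg : pvFindContains (PySem.List.slice ls (some (((e : Nat) : Int) + 1)) none) pvPAT <;>
          simp [hg] <;> try omega
      · have hn : pvEND ∉ l :: ls := by
          intro h
          rcases List.mem_cons.mp h with h | h
          · exact he h.symm
          · exact hm h
        have h1 : pvSpecial (l :: ls) = none := by
          have hc : (l :: ls).contains pvEND = false := by simpa using hn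
          unfold pvSpecial
          rw [hc]
          simp
        have h2 : pvSpecRel ls = none := by
          rw [← ih]
          have hc : ls.contains pvEND = false := by simpa using hm
          unfold pvSpecial
          rw [hc]
          simp
        simp [h1, pvSpecRel, he, h2]

-- ===== VERDICT (by name: the statement is the Claim_ definition above) =====
theorem sanitize_slim_spec : Claim_equal_sanitize_slim := by
  intro raw_lines _
  unfold Spec_sanitize_slim sanitize_slim sanitize_slim_alt
  dsimp only
  rw [pvBfold (pvSpecial raw_lines) raw_lines [] 0 0, pvShift_zero,
    pvSpecial_eq_specRel]
  have h := pvA1 raw_lines [] 0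
  simp only [List.nil_append, zero_add] at h ⊢
  rw [Prod.mk.injEq]
  exact h
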